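-- pv_equiv track=rewrite | github.com/bcl/aisparser | python/freebsd/nmea.py | make_checksum
-- ===== SOURCE A (Python) =====
-- def make_checksum(msg):
--     """
--     Make a NMEA 0183 checksum on a string. Skips leading ! or $ and stops
--     at *
--     It ignores anything before the first $ or ! in the string
--
--     Returns None if there was an invalid start character
--     Otherwise returns the checksum
--     """
--
--     # Find the start of the NMEA sentence
--     startchars = "!$"
--     for c in startchars:
--         i = msg.find(c)
--         if i >= 0:
--             break
--     else:
--         return None
--
--     # Calculate the checksum on the message
--     sum1 = 0
--     for c in msg[i+1:]:
--         if c == '*':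
--             break
--         sum1 = sum1 ^ ord(c)
--     sum1 = sum1 & 0xFF
--
--     return sum1
-- ===== SOURCE B (Python) =====
-- def make_checksum(msg):
--     # start index: '!' takes precedence over '$' (as in A's "!$" scan)
--     i = msg.find('!')
--     if i < 0:
--         i = msg.find('$')
--         if i < 0:
--             return None
--     # prefix-XOR table: prefix[k] = XOR of ord(c) for c in msg[:k]
--     prefix = [0]
--     for c in msg:
--         prefix.append(prefix[-1] ^ ord(c))
--     # checksum region is msg[i+1:j): a range-XOR query on the table
--     j = msg.find('*', i + 1)
--     if j < 0:
--         j = len(msg)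
--     return (prefix[j] ^ prefix[i + 1]) & 0xFF
-- ===== Notes on version B (the rewrite author's own statement) =====
-- stated objective: alternative
-- what changed: B builds a prefix-XOR table over the whole string and answers the checksum as a range-XOR query prefix[j]^prefix[i+1] between the start index and the terminator index, instead of A's scan-with-break XOR loop over the tail.
import Mathlib
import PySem

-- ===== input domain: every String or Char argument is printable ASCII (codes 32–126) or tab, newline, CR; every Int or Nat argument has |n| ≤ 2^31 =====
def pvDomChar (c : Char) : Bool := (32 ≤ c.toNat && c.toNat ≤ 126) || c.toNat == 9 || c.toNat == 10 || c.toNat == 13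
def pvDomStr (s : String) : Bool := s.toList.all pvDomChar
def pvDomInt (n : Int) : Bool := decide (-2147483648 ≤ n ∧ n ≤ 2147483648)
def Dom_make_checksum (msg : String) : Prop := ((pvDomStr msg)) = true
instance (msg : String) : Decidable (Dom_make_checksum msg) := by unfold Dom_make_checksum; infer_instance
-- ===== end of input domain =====

-- B replaces A's scan-with-break XOR loop by a prefix-XOR table over the whole string
-- and a range-XOR query prefix[j] ^ prefix[i+1] between start and terminator (alternative algorithm).

-- ===== PORT A =====
-- 'for c in startchars: i = msg.find(c); if i >= 0: break / else: return None'
def pvFindStartA (cs : List Char) (msg : String) : Option Int :=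
  match cs with
  | [] => none
  | c :: rest =>
    let i := PySem.Str.find msg (String.ofList [c])
    if 0 ≤ i then some i else pvFindStartA rest msg

-- 'for c in msg[i+1:]: if c == '*': break; sum1 = sum1 ^ ord(c)'
def pvSumLoopA (l : List Char) (sum1 : Int) : Int :=
  match l with
  | [] => sum1
  | c :: rest => if c = '*' then sum1 else pvSumLoopA rest (PySem.Int.bxor sum1 (c.toNat : Int))

def make_checksum (msg : String) : Option Int :=
  match pvFindStartA ['!', '$'] msg with
  | none => none
  | some i =>
      let tail := PySem.Str.slice msg (some (i + 1)) none
      some (PySem.Int.band (pvSumLoopA tail.toList 0) 255)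

-- ===== PORT B =====
def make_checksum_alt (msg : String) : Option Int :=
  let i0 := PySem.Str.find msg "!"
  let i := if i0 < 0 then PySem.Str.find msg "$" else i0
  if i < 0 then none
  else
    -- prefix[k] = XOR of ord(c) for c in msg[:k]; built by one append-fold over msg
    let pfx := msg.toList.foldl
      (fun P c => P ++ [PySem.Int.bxor (PySem.List.pyGetD P (-1) 0) ((c.toNat : Int))]) [0]
    let j0 := PySem.Str.findFrom msg "*" (i + 1)
    let j := if j0 < 0 then PySem.Str.len msg else j0
    some (PySem.Int.band
      (PySem.Int.bxor (PySem.List.pyGetD pfx j 0) (PySem.List.pyGetD pfx (i + 1) 0)) 255)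

-- ===== PRECONDITION & SPEC =====
def Spec_make_checksum (msg : String) (out : Option Int) : Prop := out = make_checksum_alt msg
instance (msg : String) (out : Option Int) : Decidable (Spec_make_checksum msg out) := by unfold Spec_make_checksum; infer_instance

-- ===== CLAIM (what is proved, stated in full; the proofs are below) =====
def Claim_equal_make_checksum : Prop := ∀ (msg : String), Dom_make_checksum msg → Spec_make_checksum msg (make_checksum msg)

-- ===== LEMMAS AND PROOFS =====

-- Nat-level prefix machinery for B's table
def pvNatFold (l : List Char) (s : Nat) : Nat := l.foldl (fun a c => a ^^^ c.toNat) s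

def pvPrefN (l : List Char) (s : Nat) : List Nat :=
  match l with
  | [] => []
  | c :: t => (s ^^^ c.toNat) :: pvPrefN t (s ^^^ c.toNat)

-- B's append-fold builds exactly the cast of the Nat prefix table
theorem pvPfx_eq (l : List Char) (init : List Int) (s : Nat) :
    l.foldl (fun P c => P ++ [PySem.Int.bxor (PySem.List.pyGetD P (-1) 0) ((c.toNat : Int))])
      (init ++ [(s : Int)])
      = init ++ (s :: pvPrefN l s).map (fun n => (n : Int)) := by
  induction l generalizing init s with
  | nil => rfl
  | cons c t ih =>
    simp only [List.foldl_cons, PySem.List.pyGetD_neg_one_append_singleton,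
      PySem.Int.bxor_natCast]
    rw [ih (init ++ [(s : Int)]) (s ^^^ c.toNat)]
    simp [pvPrefN]

theorem pvPrefN_getD (l : List Char) (s : Nat) (n : Nat) (hn : n ≤ l.length) :
    (s :: pvPrefN l s).getD n 0 = pvNatFold (l.take n) s := by
  induction l generalizing s n with
  | nil =>
    have h0 : n = 0 := Nat.le_zero.mp (by simpa using hn)
    subst h0
    simp [pvNatFold]
  | cons c t ih =>
    cases n with
    | zero => simp [pvNatFold]
    | succ m =>
      have hm : m ≤ t.length := by simpa using hn
      simp only [pvPrefN, List.getD_cons_succ, List.take_succ_cons]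
      exact ih (s ^^^ c.toNat) m hm

-- the cast bridge for both ports' folds
theorem pvFold_cast (l : List Char) (s : Nat) :
    l.foldl (fun acc c => PySem.Int.bxor acc ((c.toNat : Int))) ((s : Nat) : Int)
      = ((pvNatFold l s : Nat) : Int) := by
  induction l generalizing s with
  | nil => rfl
  | cons c t ih => simp only [List.foldl_cons, PySem.Int.bxor_natCast, pvNatFold] at *; exact ih _

-- A's scan-with-break equals a fold over the prefix before the first '*'.
theorem pvSumLoopA_eq_takeWhile (l : List Char) (s : Int) :
    pvSumLoopA l s = (l.takeWhile (fun c => !(c == '*'))).foldl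
      (fun acc c => PySem.Int.bxor acc (c.toNat : Int)) s := by
  induction l generalizing s with
  | nil => rfl
  | cons c rest ih =>
    by_cases h : c = '*' <;> simp [pvSumLoopA, h, ih]

-- take up to a position whose element fails p, all earlier ones passing, is takeWhile
theorem pvTake_eq_takeWhile (p : Char → Bool) (l : List Char) (n : Nat) (hn : n < l.length)
    (hne : p (l[n]'hn) = false) (hmin : ∀ i (h : i < n), p (l[i]'(Nat.lt_trans h hn)) = true) :
    l.take n = l.takeWhile p := by
  induction l generalizing n with
  | nil => simp at hn
  | cons a t ih =>
    cases n with
    | zero => simp at hne; simp [hne]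
    | succ m =>
      have ha : p a = true := hmin 0 (Nat.succ_pos m)
      simp only [List.take_succ_cons, List.takeWhile_cons, ha, if_true]
      have hn' : m < t.length := by simpa using hn
      have hne' : p (t[m]'hn') = false := by simpa using hne
      refine congrArg (a :: ·) (ih m hn' hne' ?_)
      intro i hi
      simpa using hmin (i + 1) (Nat.succ_lt_succ hi)

-- the segment up to the first '*' (or all of d if absent) is the takeWhile prefix
theorem pvSeg_eq_takeWhile (d : List Char) :
    d.take (if 0 ≤ PySem.Chars.find d ['*'] then (PySem.Chars.find d ['*']).toNat else d.length)
      = d.takeWhile (fun c => !(c == '*')) := by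
  by_cases h : 0 ≤ PySem.Chars.find d ['*']
  · obtain ⟨hpre, hmin⟩ := PySem.Chars.find_spec h
    obtain ⟨tl, htl⟩ := hpre
    have hlen : (PySem.Chars.find d ['*']).toNat < d.length := by
      have := congrArg List.length htl; simp at this; omega
    have hget : d[(PySem.Chars.find d ['*']).toNat]'hlen = '*' := by
      have h0 : (d.drop (PySem.Chars.find d ['*']).toNat)[0]'(by rw [← htl]; simp) = '*' := by
        simp [← htl]
      simpa using h0
    rw [if_pos h]
    refine pvTake_eq_takeWhile _ _ _ hlen (by simp [hget]) ?_
    intro i hi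
    have hne' : d[i]'(Nat.lt_trans hi hlen) ≠ '*' := by
      intro heq
      exact hmin i hi ⟨d.drop (i + 1), by
        rw [List.drop_eq_getElem_cons (Nat.lt_trans hi hlen), heq]; rfl⟩
    simp [hne']
  · have h1 : PySem.Chars.find d ['*'] = -1 := by
      have := PySem.Chars.neg_one_le_find d ['*']; omega
    have hnotin : '*' ∉ d := by
      have hni := (PySem.Chars.find_eq_neg_one_iff d ['*']).mp h1
      exact fun hm => hni ((List.singleton_infix_iff '*' d).mpr hm)
    rw [if_neg h, List.take_length]
    exact (List.takeWhile_eq_self_iff.mpr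
      (by intro x hx; simp; exact fun he => hnotin (he ▸ hx))).symm

-- XOR fold: pulling the seed out
theorem pvNatFold_shift (l : List Char) (s : Nat) : pvNatFold l s = s ^^^ pvNatFold l 0 := by
  induction l generalizing s with
  | nil => simp [pvNatFold]
  | cons c t ih =>
    simp only [pvNatFold, List.foldl_cons] at *
    rw [ih (s ^^^ c.toNat), ih (0 ^^^ c.toNat), Nat.zero_xor, Nat.xor_assoc]

-- the range-XOR identity: prefix[j] ^ prefix[k] = XOR over l[k:j]  (k ≤ j)
theorem pvRangeXor (l : List Char) (k j : Nat) (hkj : k ≤ j) :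
    pvNatFold (l.take j) 0 ^^^ pvNatFold (l.take k) 0 = pvNatFold ((l.drop k).take (j - k)) 0 := by
  have hsplit : l.take j = l.take k ++ (l.drop k).take (j - k) := by
    rw [← List.take_add]
    congr 1
    omega
  have h1 : pvNatFold (l.take k ++ (l.drop k).take (j - k)) 0
      = pvNatFold (l.take k) 0 ^^^ pvNatFold ((l.drop k).take (j - k)) 0 := by
    simp only [pvNatFold, List.foldl_append]
    exact pvNatFold_shift _ _
  rw [hsplit, h1, Nat.xor_comm (pvNatFold (l.take k) 0), Nat.xor_assoc, Nat.xor_self,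
    Nat.xor_zero]

-- getD through a Nat→Int cast map
theorem pvMapGetD (xs : List Nat) (n : Nat) :
    (xs.map (fun m => (m : Int))).getD n 0 = ((xs.getD n 0 : Nat) : Int) := by
  induction xs generalizing n with
  | nil => cases n <;> rfl
  | cons a t ih => cases n with
    | zero => rfl
    | succ m => simp only [List.getD_cons_succ]; exact ih m

-- index into B's table = XOR of the corresponding prefix of msg
theorem pvPfx_getD (l : List Char) (n : Nat) (hn : n ≤ l.length) :
    PySem.List.pyGetD ((0 :: pvPrefN l 0).map (fun m => (m : Int))) ((n : Nat) : Int) 0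
      = ((pvNatFold (l.take n) 0 : Nat) : Int) := by
  rw [PySem.List.pyGetD_natCast, pvMapGetD, pvPrefN_getD l 0 n hn]

-- the common body: A's masked scan = B's masked range query, given a valid start index i
theorem pvBody_eq (msg : String) (i : Int) (hi : 0 ≤ i)
    (hilen : i.toNat < msg.toList.length) :
    PySem.Int.band (pvSumLoopA (PySem.Str.slice msg (some (i + 1)) none).toList 0) 255
      = PySem.Int.band
          (PySem.Int.bxor
            (PySem.List.pyGetD
              (msg.toList.foldl
                (fun P c => P ++ [PySem.Int.bxor (PySem.List.pyGetD P (-1) 0) ((c.toNat : Int))]) [0])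
              (if PySem.Str.findFrom msg "*" (i + 1) < 0 then PySem.Str.len msg
               else PySem.Str.findFrom msg "*" (i + 1)) 0)
            (PySem.List.pyGetD
              (msg.toList.foldl
                (fun P c => P ++ [PySem.Int.bxor (PySem.List.pyGetD P (-1) 0) ((c.toNat : Int))]) [0])
              (i + 1) 0))
          255 := by
  set l := msg.toList with hl
  set k : Nat := (i + 1).toNat with hk
  have hik : i + 1 = (k : Int) := by omega
  have hklen : k ≤ l.length := by omega
  -- B's table
  have hpfx : l.foldl
      (fun P c => P ++ [PySem.Int.bxor (PySem.List.pyGetD P (-1) 0) ((c.toNat : Int))]) [0]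
      = (0 :: pvPrefN l 0).map (fun m => (m : Int)) := by
    have := pvPfx_eq l [] 0
    simpa using this
  -- the terminator index
  set f : Int := PySem.Chars.find (l.drop k) ['*'] with hf
  have hfind : PySem.Str.findFrom msg "*" (i + 1)
      = if f = -1 then -1 else (k : Int) + f := by
    rw [hik, PySem.Str.findFrom_eq]
    have := PySem.Chars.findFrom_natCast msg.toList ("*" : String).toList k hklen
    rw [this]
    have hsub : ("*" : String).toList = ['*'] := by decide
    rw [hsub, ← hl, ← hf]
  have hflen : f ≤ (l.drop k).length := PySem.Chars.find_le_length _ _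
  have hfge : -1 ≤ f := PySem.Chars.neg_one_le_find _ _
  set jN : Nat := if 0 ≤ f then k + f.toNat else l.length with hjN
  have hj : (if PySem.Str.findFrom msg "*" (i + 1) < 0 then PySem.Str.len msg
      else PySem.Str.findFrom msg "*" (i + 1)) = ((jN : Nat) : Int) := by
    rw [hfind]
    by_cases h0 : 0 ≤ f
    · have hne : ¬ (f = -1) := by omega
      have : ¬ ((k : Int) + f < 0) := by omega
      simp only [hne, if_false, this, if_false, hjN, h0, if_true]
      push_cast; omega
    · have : f = -1 := by omega
      simp only [this]
      norm_num [PySem.Str.len_eq, hjN, h0, ← hl]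
  have hkj : k ≤ jN := by
    rw [hjN]; split <;> omega
  have hjlen : jN ≤ l.length := by
    rw [hjN]
    have : (l.drop k).length = l.length - k := by simp
    split <;> omega
  -- A's slice
  have hslice : (PySem.Str.slice msg (some (i + 1)) none).toList = l.drop k := by
    simp [hik, ← hl]
  -- the segment
  have hseg : (l.drop k).take (jN - k) = (l.drop k).takeWhile (fun c => !(c == '*')) := by
    rw [← pvSeg_eq_takeWhile (l.drop k), ← hf]
    congr 1
    have : (l.drop k).length = l.length - k := by simp
    rw [hjN]; split <;> omega
  -- assemble
  rw [hslice, hpfx, hj, hik, pvSumLoopA_eq_takeWhile]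
  rw [pvPfx_getD l jN hjlen, pvPfx_getD l k hklen]
  rw [PySem.Int.bxor_natCast, pvRangeXor l k jN hkj, hseg]
  have h0 : (0 : Int) = ((0 : Nat) : Int) := rfl
  rw [h0, pvFold_cast]

-- ===== VERDICT (by name: the statement is the Claim_ definition above) =====
theorem make_checksum_spec : Claim_equal_make_checksum := by
  intro msg _
  have hbang : (String.ofList ['!']).toList = ("!" : String).toList := by decide
  have hdollar : (String.ofList ['$']).toList = ("$" : String).toList := by decide
  have hfound : ∀ c : Char, ∀ h : 0 ≤ PySem.Chars.find msg.toList [c],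
      (PySem.Chars.find msg.toList [c]).toNat < msg.toList.length := by
    intro c h
    obtain ⟨⟨tl, htl⟩, -⟩ := PySem.Chars.find_spec h
    have := congrArg List.length htl
    simp only [List.length_drop, List.length_append, List.length_cons] at this
    omega
  simp only [Spec_make_checksum, make_checksum, make_checksum_alt, pvFindStartA,
    PySem.Str.find_eq, hbang, hdollar]
  by_cases h1 : 0 ≤ PySem.Chars.find msg.toList ("!" : String).toList
  · have h1' : ¬ PySem.Chars.find msg.toList ("!" : String).toList < 0 := by omega
    simp only [if_pos h1, if_neg h1']
    have hlt := hfound '!' (by simpa [show ("!" : String).toList = ['!'] by decide] using h1)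
    rw [pvBody_eq msg _ h1 (by simpa [show ("!" : String).toList = ['!'] by decide] using hlt)]
  · have h1' : PySem.Chars.find msg.toList ("!" : String).toList < 0 := by omega
    by_cases h2 : 0 ≤ PySem.Chars.find msg.toList ("$" : String).toList
    · have h2' : ¬ PySem.Chars.find msg.toList ("$" : String).toList < 0 := by omega
      simp only [if_neg h1, if_pos h2, if_pos h1', if_neg h2']
      have hlt := hfound '$' (by simpa [show ("$" : String).toList = ['$'] by decide] using h2)
      rw [pvBody_eq msg _ h2 (by simpa [show ("$" : String).toList = ['$'] by decide] using hlt)]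
    · have h2' : PySem.Chars.find msg.toList ("$" : String).toList < 0 := by omega
      simp only [if_neg h1, if_neg h2, if_pos h1', if_pos h2']
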